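-- pv_equiv track=rewrite | github.com/avi09/Hackerrank | FunctionalString.py | function
-- ===== SOURCE A (Python) =====
-- def modulo(x):
--
--     for i in range(1):
--         y=i
--     y = int(str(1) + str(y))
--     return x%(y**9+7)
--
-- def function(s):
--     subs =[s[i:j] for i in range(len(s)) for j in range(i+1,len(s)+1)]
--     r=-1
--     for i in subs:
--         x1 = len(i)
--         tm=[]
--         for j in i:
--             tm.append(j)
--         x2=len(set(tm))
--         r+=modulo(x1**x2)
--     return modulo(r+1)
-- ===== SOURCE B (Python) =====
-- def function(s):
--     M = 10 ** 9 + 7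
--     n = len(s)
--     total = 0
--     for i in range(n):
--         seen = set()
--         d = 0
--         for j in range(i, n):
--             c = s[j]
--             if c not in seen:
--                 seen.add(c)
--                 d += 1
--             total = (total + pow(j - i + 1, d, M)) % M
--     return total
-- ===== Notes on version B (the rewrite author's own statement) =====
-- stated objective: faster
-- what changed: Replaces A's materialisation of all O(n^2) substrings with a per-substring list copy, set rebuild and full-width integer exponentiation by a per-start-index sweep that maintains the distinct-character count incrementally and uses modular pow with a running modulus.
import Mathlib
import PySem

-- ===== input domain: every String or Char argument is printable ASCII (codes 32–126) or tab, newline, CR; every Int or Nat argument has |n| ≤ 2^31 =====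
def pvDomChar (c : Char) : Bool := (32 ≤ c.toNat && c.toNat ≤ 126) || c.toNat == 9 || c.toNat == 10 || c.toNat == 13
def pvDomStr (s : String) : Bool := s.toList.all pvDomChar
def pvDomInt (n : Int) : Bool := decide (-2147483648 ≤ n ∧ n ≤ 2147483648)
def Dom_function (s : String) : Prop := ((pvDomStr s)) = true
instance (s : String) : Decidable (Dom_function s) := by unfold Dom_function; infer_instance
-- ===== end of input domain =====

-- B replaces A's O(n^3)-substrings-with-set-rebuild by an incremental per-start distinct count
-- with modular exponentiation and a running modulus (faster, in a timing run).

-- ===== PORT A =====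
-- helper 'modulo' of A: the for-loop leaves y = 0, then y = int(str(1)+str(0)) = 10
def modulo (x : Int) : Int :=
  let y : Int := (PySem.List.pyRange 0 1).foldl (fun _ i => i) 0
  let y : Int := (PySem.Int.ofStr? (PySem.Int.toStr 1 ++ PySem.Int.toStr y)).getD 0
  PySem.Int.mod x (y ^ (9 : Nat) + 7)

def function (s : String) : Int :=
  let cs := s.toList
  let n := cs.length
  let subs : List (List Char) :=
    (PySem.List.pyRange 0 (n : Int)).flatMap (fun i =>
      (PySem.List.pyRange (i + 1) ((n : Int) + 1)).map
        (fun j => PySem.List.slice cs (some i) (some j)))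
  let r : Int := subs.foldl (fun r sub =>
    let x1 : Int := sub.length
    let tm : List Char := sub.foldl (fun tm c => tm ++ [c]) []
    let x2 : Int := ((PySem.Set.ofList tm).length : Int)
    -- x1 ** x2: the exponent x2 = len(set(..)) is a nonnegative int, so '^ x2.toNat' is exact
    r + modulo (x1 ^ x2.toNat)) (-1)
  modulo (r + 1)

-- ===== PORT B =====
def function_alt (s : String) : Int :=
  let cs := s.toList
  let M : Int := 10 ^ (9 : Nat) + 7
  let n : Int := cs.length
  (PySem.List.pyRange 0 n).foldl (fun total i =>
    ((PySem.List.pyRange i n).foldl (fun (st : PySem.Set Char × Int × Int) j =>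
        let c := PySem.List.pyGetD cs j ' '  -- s[j]; j is always in range here
        let sd := if PySem.Set.contains st.1 c then (st.1, st.2.1)
                  else (PySem.Set.add st.1 c, st.2.1 + 1)
        -- pow(j-i+1, d, M): d = sd.2 is a nonnegative int, so '.toNat' is exact
        (sd.1, sd.2, PySem.Int.mod (st.2.2 + PySem.Int.powMod (j - i + 1) sd.2.toNat M) M))
      (PySem.Set.empty, 0, total)).2.2) 0

-- ===== PRECONDITION & SPEC =====
def Spec_function (s : String) (out : Int) : Prop := out = function_alt s
instance (s : String) (out : Int) : Decidable (Spec_function s out) := by unfold Spec_function; infer_instance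

-- ===== CLAIM (what is proved, stated in full; the proofs are below) =====
def Claim_equal_function : Prop := ∀ (s : String), Dom_function s → Spec_function s (function s)

-- ===== LEMMAS AND PROOFS =====

-- the modulus
def pvM : Int := 1000000007

-- distinct-character count of the first k characters of t
def pvDct (t : List Char) (k : Nat) : Nat := (PySem.Set.ofList (t.take k)).length

-- A's per-substring summand for the substring of t of length k+1, already reduced mod M
def pvTerm (t : List Char) (k : Nat) : Int := ((k + 1 : Nat) : Int) ^ (pvDct t (k + 1)) % pvM

-- sum of the summands of all prefixes of t (the substrings starting at one index)
def pvS (t : List Char) : Int := ((List.range t.length).map (pvTerm t)).sum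


theorem modulo_eq (x : Int) : modulo x = x % pvM := by
  have h : modulo x = PySem.Int.mod x 1000000007 := rfl
  rw [h, PySem.Int.mod_eq_emod_of_pos (by norm_num)]; rfl

theorem A_inner (cs : List Char) (i : Nat) (hi : i ≤ cs.length) (r : Int) :
    ((PySem.List.pyRange ((i : Int) + 1) ((cs.length : Int) + 1)).map
        (fun j => PySem.List.slice cs (some (i : Int)) (some j))).foldl
      (fun r sub =>
        r + modulo ((sub.length : Int) ^ (((PySem.Set.ofList
            (sub.foldl (fun tm c => tm ++ [c]) [])).length : Int)).toNat)) r
    = r + pvS (cs.drop i) := by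
  rw [PySem.List.pyRange_one, List.map_map, List.foldl_map]
  have hlen : (((cs.length : Int) + 1) - ((i : Int) + 1)).toNat = cs.length - i := by omega
  rw [hlen]
  rw [PySem.List.foldl_congr_mem _ _
    (fun r k => r + pvTerm (cs.drop i) k) _ ?_]
  · rw [PySem.List.foldl_add]
    unfold pvS
    rw [List.length_drop]
  · intro acc k hk
    simp only [Function.comp, List.mem_range] at hk ⊢
    have h1 : ((i : Int) + 1 + (k : Int)) = ((i + 1 + k : Nat) : Int) := by push_cast; ring
    rw [h1, PySem.List.slice_natCast]
    have h2 : i + 1 + k - i = k + 1 := by omega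
    rw [h2, PySem.List.foldl_append_singleton_eq_self]
    have h3 : (List.take (k + 1) (List.drop i cs)).length = k + 1 := by
      simp [List.length_take, List.length_drop]; omega
    rw [List.nil_append, h3, modulo_eq]
    have h4 : (((PySem.Set.ofList (List.take (k + 1) (List.drop i cs))).length : Int)).toNat
        = pvDct (List.drop i cs) (k + 1) := by simp [pvDct]
    rw [h4]
    simp [pvTerm]

theorem A_eq (s : String) :
    function s =
      (((List.range s.toList.length).map (fun i => pvS (s.toList.drop i))).sum) % pvM := by
  unfold function
  simp only [List.foldl_flatMap]
  rw [PySem.List.pyRange_zero_nat, List.foldl_map]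
  rw [PySem.List.foldl_congr_mem _ _
    (fun r i => r + pvS (s.toList.drop i)) _ ?_]
  · rw [PySem.List.foldl_add, modulo_eq]
    ring_nf
  · intro acc i hi
    simp only [List.mem_range] at hi
    exact A_inner s.toList i (le_of_lt hi) acc

def pvBstep (t : List Char) (st : PySem.Set Char × Int × Int) (k : Nat) : PySem.Set Char × Int × Int :=
  let c := t.getD k ' '
  let sd := if PySem.Set.contains st.1 c then (st.1, st.2.1)
            else (PySem.Set.add st.1 c, st.2.1 + 1)
  (sd.1, sd.2, (st.2.2 + ((k + 1 : Nat) : Int) ^ sd.2.toNat % pvM) % pvM)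

theorem B_state (t : List Char) (k : Nat) (hk : k ≤ t.length) (T : Int) (hT : T % pvM = T) :
    (List.range k).foldl (pvBstep t) (PySem.Set.empty, 0, T) =
      (PySem.Set.ofList (t.take k), ((pvDct t k : Nat) : Int),
        (T + ((List.range k).map (pvTerm t)).sum) % pvM) := by
  induction k with
  | zero => simp [pvDct, PySem.Set.empty, hT]
  | succ k ih =>
    have hk' : k ≤ t.length := by omega
    rw [List.range_succ, List.foldl_append, ih hk', List.foldl_cons, List.foldl_nil]
    have hlt : k < t.length := by omega
    have htake : t.take (k + 1) = t.take k ++ [t[k]] := by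
      rw [List.take_add_one, List.getElem?_eq_getElem hlt]; rfl
    have hget : t.getD k ' ' = t[k] := by
      rw [List.getD_eq_getElem?_getD, List.getElem?_eq_getElem hlt]; rfl
    unfold pvBstep
    simp only [hget]
    rw [List.map_append, List.sum_append, List.map_cons, List.map_nil, List.sum_cons, List.sum_nil]
    by_cases hmem : t[k] ∈ PySem.Set.ofList (t.take k)
    · have hc : PySem.Set.contains (PySem.Set.ofList (t.take k)) t[k] = true :=
        (PySem.Set.contains_iff _ _).mpr hmem
      simp only [hc, if_true]
      have hset : PySem.Set.ofList (t.take (k+1)) = PySem.Set.ofList (t.take k) := by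
        rw [htake, PySem.Set.ofList_append_singleton, PySem.Set.add_of_mem hmem]
      have hd : pvDct t (k+1) = pvDct t k := by unfold pvDct; rw [hset]
      refine Prod.ext (by simp [hset]) (Prod.ext (by simp [hd]) ?_)
      simp only []
      have : ((pvDct t k : Nat) : Int).toNat = pvDct t k := by simp
      rw [this]
      rw [Int.emod_add_emod]
      have : pvTerm t k = ((k + 1 : Nat) : Int) ^ (pvDct t (k+1)) % pvM := rfl
      rw [this, hd]
      ring_nf
    · have hc : PySem.Set.contains (PySem.Set.ofList (t.take k)) t[k] = false := by
        simp [hmem]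
      simp only [hc, Bool.false_eq_true, if_false]
      have hset : PySem.Set.ofList (t.take (k+1)) = PySem.Set.ofList (t.take k) ++ [t[k]] := by
        rw [htake, PySem.Set.ofList_append_singleton, PySem.Set.add_of_not_mem hmem]
      have hd : pvDct t (k+1) = pvDct t k + 1 := by
        unfold pvDct; rw [hset]; simp
      refine Prod.ext (by simp [hset, PySem.Set.add_of_not_mem hmem]) (Prod.ext (by simp [hd]) ?_)
      have h2 : ((pvDct t k : Nat) : Int) + 1 = ((pvDct t (k+1) : Nat) : Int) := by
        rw [hd]; push_cast; ring
      simp only [h2]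
      have : ((pvDct t (k+1) : Nat) : Int).toNat = pvDct t (k+1) := by simp
      rw [this]
      rw [Int.emod_add_emod]
      have : pvTerm t k = ((k + 1 : Nat) : Int) ^ (pvDct t (k+1)) % pvM := rfl
      rw [this]
      ring_nf

theorem B_inner (cs : List Char) (i : Nat) (hi : i < cs.length) (T : Int) (hT : T % pvM = T) :
    ((PySem.List.pyRange (i : Int) (cs.length : Int)).foldl
      (fun (st : PySem.Set Char × Int × Int) j =>
        let c := PySem.List.pyGetD cs j ' '
        let sd := if PySem.Set.contains st.1 c then (st.1, st.2.1)
                  else (PySem.Set.add st.1 c, st.2.1 + 1)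
        (sd.1, sd.2, PySem.Int.mod (st.2.2 + PySem.Int.powMod (j - (i : Int) + 1) sd.2.toNat (10 ^ (9 : Nat) + 7)) (10 ^ (9 : Nat) + 7)))
      (PySem.Set.empty, 0, T)).2.2 = (T + pvS (cs.drop i)) % pvM := by
  rw [PySem.List.pyRange_one, List.foldl_map]
  have hlen : ((cs.length : Int) - (i : Int)).toNat = cs.length - i := by omega
  rw [hlen]
  rw [PySem.List.foldl_congr_mem _ _ (pvBstep (cs.drop i)) _ ?_]
  · rw [B_state (cs.drop i) (cs.length - i) (by simp) T hT]
    simp [pvS]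
  · intro acc k hk
    simp only [List.mem_range] at hk
    have h1 : ((i : Int) + (k : Int)) = ((i + k : Nat) : Int) := by push_cast; ring
    have hik : i + k < cs.length := by omega
    have hc : PySem.List.pyGetD cs ((i : Int) + (k : Int)) ' ' = (cs.drop i).getD k ' ' := by
      rw [h1, PySem.List.pyGetD_natCast]
      rw [List.getD_eq_getElem?_getD, List.getD_eq_getElem?_getD, List.getElem?_drop]
    have h2 : ((i : Int) + (k : Int)) - (i : Int) + 1 = ((k + 1 : Nat) : Int) := by push_cast; ring
    simp only [hc, h2]
    unfold pvBstep
    have h3 : (0 : Int) < 10 ^ (9 : Nat) + 7 := by norm_num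
    rw [PySem.Int.mod_eq_emod_of_pos h3, PySem.Int.powMod_eq_emod _ _ h3]
    norm_num [pvM]

theorem foldl_inv {α : Type} (l : List α) (f : Int → α → Int) (g : α → Int)
    (h : ∀ (T : Int), ∀ x ∈ l, T % pvM = T → f T x = (T + g x) % pvM)
    (T : Int) (hT : T % pvM = T) :
    l.foldl f T = (T + (l.map g).sum) % pvM := by
  induction l generalizing T with
  | nil => simpa using hT.symm
  | cons a l ih =>
    rw [List.foldl_cons, h T a (by simp) hT, List.map_cons, List.sum_cons]
    rw [ih (fun T x hx => h T x (by simp [hx])) _ (Int.emod_emod_of_dvd _ dvd_rfl)]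
    rw [Int.emod_add_emod]; ring_nf

theorem B_eq (s : String) :
    function_alt s =
      (((List.range s.toList.length).map (fun i => pvS (s.toList.drop i))).sum) % pvM := by
  unfold function_alt
  simp only []
  rw [PySem.List.pyRange_zero_nat, List.foldl_map]
  rw [foldl_inv _ _ (fun i => pvS (s.toList.drop i)) ?_ 0 (by norm_num)]
  · ring_nf
  · intro T i hi hT
    simp only [List.mem_range] at hi
    exact B_inner s.toList i hi T hT

-- ===== VERDICT (by name: the statement is the Claim_ definition above) =====
theorem function_spec : Claim_equal_function := by
  intro s _
  unfold Spec_function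
  rw [A_eq, B_eq]
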